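-- pv_equiv track=rewrite | github.com/Cross-bit/group-consensus-eval | evaluation_frameworks/consensus_evaluation/evaluation/evaluations/print/table_rfc_by_population_mood.py | strategy_2_slug
-- ===== SOURCE A (Python) =====
-- from typing import Any, Dict, List, Optional, Tuple
--
-- def strategy_2_slug(algos: List[str]) -> Dict[str, str]:
--     res = {}
--     sync_ctr = 0
--     async_ctr = 0
--     hybrid_ctr = 0
--     for algo_name in algos:
--         if "async" in algo_name:
--             res[f"A{async_ctr}"] = algo_name
--             async_ctr += 1
--         elif "hybrid" in algo_name:
--             res[f"H{hybrid_ctr}"] = algo_name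
--             hybrid_ctr += 1
--         else:
--             res[f"S{sync_ctr}"] = algo_name
--             sync_ctr += 1
--
--     return res
-- ===== SOURCE B (Python) =====
-- def strategy_2_slug(algos):
--     # Pass 1: bucket the positions of each category, preserving input order.
--     a_pos, h_pos, s_pos = [], [], []
--     for pos, name in enumerate(algos):
--         if "async" in name:
--             a_pos.append(pos)
--         elif "hybrid" in name:
--             h_pos.append(pos)
--         else:
--             s_pos.append(pos)
--     # Pass 2: scatter each bucket's rank back into a key table indexed by position.
--     keys = [None] * len(algos)
--     for prefix, positions in (("A", a_pos), ("H", h_pos), ("S", s_pos)):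
--         for j, pos in enumerate(positions):
--             keys[pos] = f"{prefix}{j}"
--     # The keys are pairwise distinct, so zipping in input order rebuilds the dict.
--     return dict(zip(keys, algos))
-- ===== Notes on version B (the rewrite author's own statement) =====
-- stated objective: alternative
-- what changed: Replaces A's single pass with interleaved counters by an inverted two-stage scheme: first bucket each element's position into three per-category position lists, then scatter each bucket's rank back into a position-indexed key table and zip it with the names; no running counters and no per-element dict insert interleaved with counting.
import Mathlib
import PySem

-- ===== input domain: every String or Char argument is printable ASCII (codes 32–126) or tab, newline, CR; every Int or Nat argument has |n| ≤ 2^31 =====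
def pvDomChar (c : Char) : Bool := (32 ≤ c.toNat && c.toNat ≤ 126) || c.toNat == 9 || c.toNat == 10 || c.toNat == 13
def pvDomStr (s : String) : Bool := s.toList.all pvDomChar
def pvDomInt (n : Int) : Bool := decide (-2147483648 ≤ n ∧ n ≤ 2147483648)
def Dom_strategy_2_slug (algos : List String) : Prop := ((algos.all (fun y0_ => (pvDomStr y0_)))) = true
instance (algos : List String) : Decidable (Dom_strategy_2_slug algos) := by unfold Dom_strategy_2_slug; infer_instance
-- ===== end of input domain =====

-- B inverts A's counter loop: it buckets positions per category, scatters ranks into a key table, and zips (alternative decomposition, not faster).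

-- ===== PORT A =====
-- loop body of A's for-loop, as a named step function over the loop state (res, sync_ctr, async_ctr, hybrid_ctr)
def pvStepA (st : PySem.Dict String String × Int × Int × Int) (algo_name : String) :
    PySem.Dict String String × Int × Int × Int :=
  let (res, sync_ctr, async_ctr, hybrid_ctr) := st
  if PySem.Str.isIn "async" algo_name then
    (res.insert ("A" ++ PySem.Int.toStr async_ctr) algo_name, sync_ctr, async_ctr + 1, hybrid_ctr)
  else if PySem.Str.isIn "hybrid" algo_name then
    (res.insert ("H" ++ PySem.Int.toStr hybrid_ctr) algo_name, sync_ctr, async_ctr, hybrid_ctr + 1)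
  else
    (res.insert ("S" ++ PySem.Int.toStr sync_ctr) algo_name, sync_ctr + 1, async_ctr, hybrid_ctr)

def strategy_2_slug (algos : List String) : List (String × String) :=
  (algos.foldl pvStepA (PySem.Dict.empty, 0, 0, 0)).1.items

-- ===== PORT B =====
-- body of B's first loop: append the element's position to its category's bucket (a_pos, h_pos, s_pos)
def pvBucketStep (st : List Int × List Int × List Int) (p : Int × String) :
    List Int × List Int × List Int :=
  if PySem.Str.isIn "async" p.2 then (st.1 ++ [p.1], st.2.1, st.2.2)
  else if PySem.Str.isIn "hybrid" p.2 then (st.1, st.2.1 ++ [p.1], st.2.2)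
  else (st.1, st.2.1, st.2.2 ++ [p.1])

-- body of B's second loop: 'for j, pos in enumerate(positions): keys[pos] = f"{prefix}{j}"'
def pvScatter (keys : List (Option String)) (pr : String × List Int) : List (Option String) :=
  (PySem.List.enumerate pr.2 0).foldl
    (fun ks jp => PySem.List.pySetD ks jp.2 (some (pr.1 ++ PySem.Int.toStr jp.1))) keys

def strategy_2_slug_alt (algos : List String) : List (String × String) :=
  let st := (PySem.List.enumerate algos 0).foldl pvBucketStep ([], [], [])
  let keys := [("A", st.1), ("H", st.2.1), ("S", st.2.2)].foldl pvScatter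
      (List.replicate algos.length (none : Option String))
  -- dict(zip(keys, algos)); every slot of keys was assigned in pass 2, so '.getD ""' never fires
  ((keys.zip algos).foldl (fun d kn => d.insert (kn.1.getD "") kn.2) PySem.Dict.empty).items

-- ===== PRECONDITION & SPEC =====
def Spec_strategy_2_slug (algos : List String) (out : List (String × String)) : Prop := out = strategy_2_slug_alt algos
instance (algos : List String) (out : List (String × String)) : Decidable (Spec_strategy_2_slug algos out) := by unfold Spec_strategy_2_slug; infer_instance

-- ===== CLAIM (what is proved, stated in full; the proofs are below) =====
def Claim_equal_strategy_2_slug : Prop := ∀ (algos : List String), Dom_strategy_2_slug algos → Spec_strategy_2_slug algos (strategy_2_slug algos)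

-- ===== LEMMAS AND PROOFS =====

-- the category tag of a name (A's branch priority)
def pvTagB (name : String) : String :=
  if PySem.Str.isIn "async" name then "A"
  else if PySem.Str.isIn "hybrid" name then "H"
  else "S"

-- common description of the insert sequence both programs perform: given the tags of the
-- already-processed prefix, the (key, value) pairs inserted for the remaining names, in order
def pvEntries : List String → List String → List (String × String)
  | [], _ => []
  | n :: l, pt =>
      (pvTagB n ++ PySem.Int.toStr (pt.count (pvTagB n) : Int), n) :: pvEntries l (pt ++ [pvTagB n])

def pvIns (d : PySem.Dict String String) (e : String × String) : PySem.Dict String String :=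
  d.insert e.1 e.2

lemma pvCount_snoc (pt : List String) (t u : String) :
    (((pt ++ [u]).count t : Nat) : Int) = (pt.count t : Int) + (if u = t then 1 else 0) := by
  by_cases h : u = t
  · subst h; simp [List.count_append]
  · simp [List.count_append, h]

lemma pvA_loop (l : List String) : ∀ (pt : List String) (d : PySem.Dict String String),
    (l.foldl pvStepA (d, (pt.count "S" : Int), (pt.count "A" : Int), (pt.count "H" : Int))).1
      = (pvEntries l pt).foldl pvIns d := by
  induction l with
  | nil => intro pt d; simp [pvEntries]
  | cons n l ih =>
    intro pt d
    by_cases ha : PySem.Str.isIn "async" n = true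
    · simp only [List.foldl_cons, pvStepA, pvEntries, pvTagB, pvIns, ha, ite_true]
      rw [show ((pt.count "A" : Int) + 1) = (((pt ++ ["A"]).count "A" : Nat) : Int) by
            rw [pvCount_snoc]; simp,
          show ((pt.count "S" : Int)) = (((pt ++ ["A"]).count "S" : Nat) : Int) by
            rw [pvCount_snoc]; simp,
          show ((pt.count "H" : Int)) = (((pt ++ ["A"]).count "H" : Nat) : Int) by
            rw [pvCount_snoc]; simp]
      exact ih (pt ++ ["A"]) _
    · by_cases hh : PySem.Str.isIn "hybrid" n = true
      · simp only [List.foldl_cons, pvStepA, pvEntries, pvTagB, pvIns, ha, hh, ite_true]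
        rw [show ((pt.count "H" : Int) + 1) = (((pt ++ ["H"]).count "H" : Nat) : Int) by
              rw [pvCount_snoc]; simp,
            show ((pt.count "S" : Int)) = (((pt ++ ["H"]).count "S" : Nat) : Int) by
              rw [pvCount_snoc]; simp,
            show ((pt.count "A" : Int)) = (((pt ++ ["H"]).count "A" : Nat) : Int) by
              rw [pvCount_snoc]; simp]
        exact ih (pt ++ ["H"]) _
      · simp only [List.foldl_cons, pvStepA, pvEntries, pvTagB, pvIns, ha, hh]
        rw [show ((pt.count "S" : Int) + 1) = (((pt ++ ["S"]).count "S" : Nat) : Int) by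
              rw [pvCount_snoc]; simp,
            show ((pt.count "A" : Int)) = (((pt ++ ["S"]).count "A" : Nat) : Int) by
              rw [pvCount_snoc]; simp,
            show ((pt.count "H" : Int)) = (((pt ++ ["S"]).count "H" : Nat) : Int) by
              rw [pvCount_snoc]; simp]
        exact ih (pt ++ ["S"]) _

-- positions (0-based, offset k) of the elements of l whose tag is t
def pvPosOf (t : String) : List String → Nat → List Nat
  | [], _ => []
  | u :: l, k => (if pvTagB u = t then [k] else []) ++ pvPosOf t l (k + 1)

lemma pvPosOf_bounds (t : String) (l : List String) : ∀ (k : Nat) (p : Nat),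
    p ∈ pvPosOf t l k → k ≤ p ∧ p < k + l.length := by
  induction l with
  | nil => intro k p hp; simp [pvPosOf] at hp
  | cons u l ih =>
    intro k p hp
    simp only [pvPosOf, List.mem_append] at hp
    rcases hp with hp | hp
    · split at hp <;> simp at hp
      simp only [List.length_cons]
      omega
    · have := ih (k + 1) p hp
      simp only [List.length_cons]
      omega

lemma pvPosOf_pairwise (t : String) (l : List String) : ∀ (k : Nat),
    (pvPosOf t l k).Pairwise (· < ·) := by
  induction l with
  | nil => intro k; simp [pvPosOf]
  | cons u l ih =>
    intro k
    simp only [pvPosOf]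
    split
    · refine List.Pairwise.cons ?_ (ih (k + 1))
      intro p hp
      have := pvPosOf_bounds t l (k + 1) p hp
      omega
    · simpa using ih (k + 1)

lemma pvTagA {u : String} (ha : PySem.Str.isIn "async" u = true) : pvTagB u = "A" := by
  simp only [pvTagB]
  rw [if_pos ha]

lemma pvTagH {u : String} (ha : ¬ PySem.Str.isIn "async" u = true)
    (hh : PySem.Str.isIn "hybrid" u = true) : pvTagB u = "H" := by
  simp only [pvTagB]
  rw [if_neg ha, if_pos hh]

lemma pvTagS {u : String} (ha : ¬ PySem.Str.isIn "async" u = true)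
    (hh : ¬ PySem.Str.isIn "hybrid" u = true) : pvTagB u = "S" := by
  simp only [pvTagB]
  rw [if_neg ha, if_neg hh]

lemma pvPosOf_cons (t u : String) (l : List String) (k : Nat) :
    pvPosOf t (u :: l) k = (if pvTagB u = t then [k] else []) ++ pvPosOf t l (k + 1) := rfl

-- B's first loop collects exactly the three position lists
lemma pvBucket_eq (l : List String) : ∀ (k : Nat) (aA aH aS : List Int),
    (PySem.List.enumerate l (k : Int)).foldl pvBucketStep (aA, aH, aS)
      = (aA ++ (pvPosOf "A" l k).map Int.ofNat,
         aH ++ (pvPosOf "H" l k).map Int.ofNat,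
         aS ++ (pvPosOf "S" l k).map Int.ofNat) := by
  induction l with
  | nil => intro k aA aH aS; simp [PySem.List.enumerate_nil, pvPosOf]
  | cons u l ih =>
    intro k aA aH aS
    rw [PySem.List.enumerate_cons, List.foldl_cons]
    have hk : ((k : Int) + 1) = ((k + 1 : Nat) : Int) := by push_cast; ring
    by_cases ha : PySem.Str.isIn "async" u = true
    · simp only [pvBucketStep, ha, ite_true]
      rw [hk, ih (k + 1)]
      rw [pvPosOf_cons, pvPosOf_cons, pvPosOf_cons, pvTagA ha,
        if_pos rfl, if_neg (by decide), if_neg (by decide)]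
      simp [List.append_assoc]
    · by_cases hh : PySem.Str.isIn "hybrid" u = true
      · simp only [pvBucketStep, ha, hh, ite_true]
        rw [hk, ih (k + 1)]
        rw [pvPosOf_cons, pvPosOf_cons, pvPosOf_cons, pvTagH ha hh,
          if_pos rfl, if_neg (by decide), if_neg (by decide)]
        simp [List.append_assoc]
      · simp only [pvBucketStep, ha, hh]
        rw [hk, ih (k + 1)]
        rw [pvPosOf_cons, pvPosOf_cons, pvPosOf_cons, pvTagS ha hh,
          if_pos rfl, if_neg (by decide), if_neg (by decide)]
        simp [List.append_assoc]

-- find? over an enumerated position list: nothing below the offset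
lemma pvFind_none (t : String) (l : List String) : ∀ (k : Nat) (j0 : Int) (m : Nat), m < k →
    (PySem.List.enumerate ((pvPosOf t l k).map Int.ofNat) j0).find?
        (fun jp => jp.2.toNat == m) = none := by
  induction l with
  | nil => intro k j0 m _; simp [pvPosOf, PySem.List.enumerate_nil]
  | cons u l ih =>
    intro k j0 m hm
    simp only [pvPosOf]
    split
    · rw [List.singleton_append, List.map_cons, PySem.List.enumerate_cons, List.find?_cons]
      have : (((Int.ofNat k).toNat == m) : Bool) = false := by
        simp; omega
      rw [this]
      exact ih (k + 1) (j0 + 1) m (by omega)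
    · rw [List.nil_append]
      exact ih (k + 1) j0 m (by omega)

-- find? over an enumerated position list at index k + i: present iff the tag matches, with the rank = prefix count
lemma pvFind (t : String) (l : List String) : ∀ (k : Nat) (j0 : Int) (i : Nat) (h : i < l.length),
    (PySem.List.enumerate ((pvPosOf t l k).map Int.ofNat) j0).find?
        (fun jp => jp.2.toNat == k + i)
      = if pvTagB l[i] = t then
          some (j0 + (((l.take i).map pvTagB).count t : Int), ((k + i : Nat) : Int))
        else none := by
  induction l with
  | nil => intro k j0 i h; simp at h
  | cons u l ih =>
    intro k j0 i h
    cases i with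
    | zero =>
      rw [pvPosOf_cons]
      simp only [List.getElem_cons_zero, List.take_zero, List.map_nil,
        List.count_nil, Nat.cast_zero, add_zero]
      by_cases hu : pvTagB u = t
      · rw [if_pos hu, if_pos hu, List.singleton_append, List.map_cons,
          PySem.List.enumerate_cons, List.find?_cons_of_pos (by simp)]
        simp
      · rw [if_neg hu, if_neg hu, List.nil_append]
        exact pvFind_none t l (k + 1) j0 k (by omega)
    | succ i =>
      have hi : i < l.length := by simpa using h
      rw [pvPosOf_cons]
      simp only [List.getElem_cons_succ]
      have hpred : (fun (jp : Int × Int) => (jp.2.toNat == k + (i + 1) : Bool))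
          = (fun jp => (jp.2.toNat == (k + 1) + i : Bool)) := by
        have : k + (i + 1) = (k + 1) + i := by omega
        rw [this]
      by_cases hu : pvTagB u = t
      · rw [if_pos hu, List.singleton_append, List.map_cons, PySem.List.enumerate_cons,
          List.find?_cons_of_neg (by simp), hpred, ih (k + 1) (j0 + 1) i hi]
        have hcnt : (((u :: l).take (i + 1)).map pvTagB).count t
            = ((l.take i).map pvTagB).count t + 1 := by
          simp [List.take_succ_cons, hu]
        by_cases hl : pvTagB l[i] = t
        · rw [if_pos hl, if_pos hl, hcnt]
          refine congrArg some (Prod.ext ?_ ?_)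
          · push_cast; ring
          · push_cast; ring
        · rw [if_neg hl, if_neg hl]
      · rw [if_neg hu, List.nil_append, hpred, ih (k + 1) j0 i hi]
        have hcnt : (((u :: l).take (i + 1)).map pvTagB).count t
            = ((l.take i).map pvTagB).count t := by
          simp [List.take_succ_cons, hu]
        by_cases hl : pvTagB l[i] = t
        · rw [if_pos hl, if_pos hl, hcnt]
          refine congrArg some (Prod.ext rfl (by push_cast; ring))
        · rw [if_neg hl, if_neg hl]

-- scattering a list of (rank, position) writes: elementwise description, positions pairwise increasing and in range
lemma pvScatter_get (pfx : String) (jps : List (Int × Int)) :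
    ∀ (keys : List (Option String)) (i : Nat),
    jps.Pairwise (fun a b => a.2.toNat < b.2.toNat) →
    (∀ jp ∈ jps, 0 ≤ jp.2 ∧ jp.2.toNat < keys.length) →
    (jps.foldl (fun ks jp => PySem.List.pySetD ks jp.2 (some (pfx ++ PySem.Int.toStr jp.1))) keys)[i]?
      = (match jps.find? (fun jp => jp.2.toNat == i) with
         | some jp => some (some (pfx ++ PySem.Int.toStr jp.1))
         | none => keys[i]?) := by
  induction jps with
  | nil => intro keys i _ _; simp
  | cons jp jps ih =>
    intro keys i hpw hr
    rw [List.foldl_cons, List.find?_cons]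
    have hnn : (0:Int) ≤ jp.2 := (hr jp (List.mem_cons_self)).1
    have hlt : jp.2.toNat < keys.length := (hr jp (List.mem_cons_self)).2
    rw [PySem.List.pySetD_of_nonneg _ _ hnn]
    have hpw' := (List.pairwise_cons.mp hpw).2
    have hhd := (List.pairwise_cons.mp hpw).1
    have hr' : ∀ q ∈ jps, 0 ≤ q.2 ∧ q.2.toNat <
        (keys.set jp.2.toNat (some (pfx ++ PySem.Int.toStr jp.1))).length := by
      intro q hq
      simpa using hr q (List.mem_cons_of_mem _ hq)
    rw [ih _ i hpw' hr']
    by_cases hi : jp.2.toNat = i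
    · have hb : ((jp.2.toNat == i) : Bool) = true := by simp [hi]
      rw [hb]
      have hnone : jps.find? (fun q => q.2.toNat == i) = none := by
        rw [List.find?_eq_none]
        intro q hq
        have := hhd q hq
        simp
        omega
      rw [hnone]
      subst hi
      simp [hlt]
    · have hb : ((jp.2.toNat == i) : Bool) = false := by simp [hi]
      rw [hb]
      cases hfind : jps.find? (fun q => q.2.toNat == i) with
      | some q => simp
      | none => simp [List.getElem?_set_ne (fun h => hi h)]

lemma pvScatter_length (keys : List (Option String)) (pr : String × List Int) :
    (pvScatter keys pr).length = keys.length := by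
  unfold pvScatter
  generalize PySem.List.enumerate pr.2 0 = jps
  induction jps generalizing keys with
  | nil => simp
  | cons jp jps ih => rw [List.foldl_cons, ih]; simp [PySem.List.length_pySetD]

-- package a bucket for pvScatter_get: the enumerate of a mapped pvPosOf list satisfies its hypotheses
lemma pvBucketJps_pairwise (t : String) (l : List String) :
    (PySem.List.enumerate ((pvPosOf t l 0).map Int.ofNat) 0).Pairwise
      (fun a b => a.2.toNat < b.2.toNat) := by
  have h1 : ((pvPosOf t l 0).map Int.ofNat).Pairwise (fun a b => a.toNat < b.toNat) := by
    rw [List.pairwise_map]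
    refine (pvPosOf_pairwise t l 0).imp ?_
    intro a b hab
    simpa using hab
  have h2 := (List.pairwise_map (f := fun p : Int × Int => p.2)
      (R := fun a b => a.toNat < b.toNat)
      (l := PySem.List.enumerate ((pvPosOf t l 0).map Int.ofNat) 0)).mp
  rw [PySem.List.map_snd_enumerate] at h2
  exact h2 h1

lemma pvBucketJps_range (t : String) (l : List String) (jp : Int × Int)
    (h : jp ∈ PySem.List.enumerate ((pvPosOf t l 0).map Int.ofNat) 0) :
    0 ≤ jp.2 ∧ jp.2.toNat < l.length := by
  obtain ⟨k, hk, rfl⟩ := (PySem.List.mem_enumerate_iff _ _ _).mp h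
  have hmem : ((pvPosOf t l 0).map Int.ofNat)[k] ∈ (pvPosOf t l 0).map Int.ofNat :=
    List.getElem_mem hk
  rw [List.mem_map] at hmem
  obtain ⟨p, hp, hpe⟩ := hmem
  have := pvPosOf_bounds t l 0 p hp
  simp only [← hpe]
  constructor
  · exact Int.natCast_nonneg p
  · simp; omega

-- one scatter layer, elementwise: it writes exactly the slots whose tag is t
lemma pvLayer (t : String) (algos : List String) (keys : List (Option String)) (i : Nat)
    (h : i < algos.length) (hlen : keys.length = algos.length) :
    (pvScatter keys (t, (pvPosOf t algos 0).map Int.ofNat))[i]?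
      = if pvTagB algos[i] = t then
          some (some (t ++ PySem.Int.toStr ((((algos.take i).map pvTagB).count t : Nat) : Int)))
        else keys[i]? := by
  unfold pvScatter
  rw [pvScatter_get t _ keys i (pvBucketJps_pairwise t algos)
      (fun jp hjp => ⟨(pvBucketJps_range t algos jp hjp).1,
        by rw [hlen]; exact (pvBucketJps_range t algos jp hjp).2⟩)]
  have hf := pvFind t algos 0 0 i h
  simp only [Nat.zero_add] at hf
  rw [hf]
  by_cases ht : pvTagB algos[i] = t
  · rw [if_pos ht, if_pos ht]; simp
  · rw [if_neg ht, if_neg ht]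

-- the key table after scattering all three buckets, elementwise
lemma pvKeys_get (algos : List String) (i : Nat) (h : i < algos.length) :
    ([("A", (pvPosOf "A" algos 0).map Int.ofNat),
      ("H", (pvPosOf "H" algos 0).map Int.ofNat),
      ("S", (pvPosOf "S" algos 0).map Int.ofNat)].foldl pvScatter
        (List.replicate algos.length (none : Option String)))[i]?
      = some (some (pvTagB algos[i]
          ++ PySem.Int.toStr ((((algos.take i).map pvTagB).count (pvTagB algos[i]) : Nat) : Int))) := by
  have hcases : pvTagB algos[i] = "A" ∨ pvTagB algos[i] = "H" ∨ pvTagB algos[i] = "S" := by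
    unfold pvTagB; split_ifs <;> simp
  simp only [List.foldl_cons, List.foldl_nil]
  have hl0 : (List.replicate algos.length (none : Option String)).length = algos.length := by simp
  have hl1 : (pvScatter (List.replicate algos.length (none : Option String))
      ("A", (pvPosOf "A" algos 0).map Int.ofNat)).length = algos.length := by
    rw [pvScatter_length]; exact hl0
  have hl2 : (pvScatter (pvScatter (List.replicate algos.length (none : Option String))
        ("A", (pvPosOf "A" algos 0).map Int.ofNat))
      ("H", (pvPosOf "H" algos 0).map Int.ofNat)).length = algos.length := by
    rw [pvScatter_length]; exact hl1
  rw [pvLayer "S" algos _ i h hl2]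
  rcases hcases with hA | hH | hS
  · rw [if_neg (by rw [hA]; decide), pvLayer "H" algos _ i h hl1,
      if_neg (by rw [hA]; decide), pvLayer "A" algos _ i h hl0, if_pos hA, hA]
  · rw [if_neg (by rw [hH]; decide), pvLayer "H" algos _ i h hl1, if_pos hH, hH]
  · rw [if_pos hS, hS]

-- elementwise description of pvEntries
lemma pvEntries_get (l : List String) : ∀ (pt : List String) (i : Nat) (h : i < l.length),
    (pvEntries l pt)[i]? = some (pvTagB l[i]
        ++ PySem.Int.toStr (((pt ++ (l.take i).map pvTagB).count (pvTagB l[i]) : Nat) : Int), l[i]) := by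
  induction l with
  | nil => intro pt i h; simp at h
  | cons n l ih =>
    intro pt i h
    cases i with
    | zero => simp [pvEntries]
    | succ i =>
      have hi : i < l.length := by simpa using h
      rw [show pvEntries (n :: l) pt
            = (pvTagB n ++ PySem.Int.toStr (pt.count (pvTagB n) : Int), n)
              :: pvEntries l (pt ++ [pvTagB n]) from rfl]
      rw [List.getElem?_cons_succ, ih (pt ++ [pvTagB n]) i hi]
      simp [List.take_succ_cons, List.append_assoc]

lemma pvEntries_length (l : List String) : ∀ pt, (pvEntries l pt).length = l.length := by
  induction l with
  | nil => intro pt; simp [pvEntries]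
  | cons n l ih => intro pt; simp [pvEntries, ih]

lemma pvZip_eq (algos : List String) :
    (([("A", (pvPosOf "A" algos 0).map Int.ofNat),
       ("H", (pvPosOf "H" algos 0).map Int.ofNat),
       ("S", (pvPosOf "S" algos 0).map Int.ofNat)].foldl pvScatter
         (List.replicate algos.length (none : Option String))).zip algos)
      = (pvEntries algos []).map (fun e => (some e.1, e.2)) := by
  have hlenK : ([("A", (pvPosOf "A" algos 0).map Int.ofNat),
       ("H", (pvPosOf "H" algos 0).map Int.ofNat),
       ("S", (pvPosOf "S" algos 0).map Int.ofNat)].foldl pvScatter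
         (List.replicate algos.length (none : Option String))).length = algos.length := by
    simp only [List.foldl_cons, List.foldl_nil]
    rw [pvScatter_length, pvScatter_length, pvScatter_length]
    simp
  apply List.ext_getElem
  · rw [List.length_zip, hlenK, List.length_map, pvEntries_length]
    simp
  · intro i h1 h2
    have hi : i < algos.length := by
      rw [List.length_zip, hlenK] at h1; omega
    rw [List.getElem_zip, List.getElem_map]
    have hK := pvKeys_get algos i hi
    have hK' := List.getElem?_eq_getElem (l := [("A", (pvPosOf "A" algos 0).map Int.ofNat),
       ("H", (pvPosOf "H" algos 0).map Int.ofNat),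
       ("S", (pvPosOf "S" algos 0).map Int.ofNat)].foldl pvScatter
         (List.replicate algos.length (none : Option String))) (i := i) (by rw [hlenK]; exact hi)
    rw [hK'] at hK
    have hE := pvEntries_get algos [] i hi
    simp only at hE
    have hE' := List.getElem?_eq_getElem (l := pvEntries algos []) (i := i)
      (by rw [pvEntries_length]; exact hi)
    rw [hE'] at hE
    have hEv := Option.some.inj hE
    rw [Option.some.inj hK, hEv]
    simp

theorem pv_main (algos : List String) : strategy_2_slug algos = strategy_2_slug_alt algos := by
  have hA := pvA_loop algos [] PySem.Dict.empty
  simp only [List.count_nil, Nat.cast_zero] at hA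
  have hb := pvBucket_eq algos 0 [] [] []
  simp only [Nat.cast_zero, List.nil_append] at hb
  unfold strategy_2_slug strategy_2_slug_alt
  rw [hA, hb]
  dsimp only
  rw [pvZip_eq algos, List.foldl_map]
  rfl

-- ===== VERDICT (by name: the statement is the Claim_ definition above) =====
theorem strategy_2_slug_spec : Claim_equal_strategy_2_slug := by
  intro algos _
  unfold Spec_strategy_2_slug
  exact pv_main algos
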